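-- pv_equiv track=rewrite | github.com/MrBrantCode/unitest_baseline | mut_generate/mist_train_taco/taco_17046/solution.py | get_nth_system_number
-- ===== SOURCE A (Python) =====
-- def get_nth_system_number(N: int) -> int:
--     # Precomputed list of system numbers
--     system_numbers = [1, 6, 7]
--     c = 1
--
--     # Generate the system numbers up to the required size
--     for x in range(3, 100001):
--         if x % 2 == 1:
--             a = system_numbers[c] * 6
--             system_numbers.append(a)
--         else:
--             system_numbers.append(a + 1)
--             c += 1
--
--     # Return the Nth system number (1-based index)
--     return system_numbers[N - 1]
-- ===== SOURCE B (Python) =====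
-- def get_nth_system_number(N: int) -> int:
--     # The sequence satisfies term(0)=1, term(i)=6*term((i-1)//2) + (1 if i even else 0):
--     # follow the halving chain from index N-1 instead of building the whole table.
--     def term(i: int) -> int:
--         if i == 0:
--             return 1
--         return 6 * term((i - 1) // 2) + (1 - i % 2)
--     return term(N - 1)
-- ===== Notes on version B (the rewrite author's own statement) =====
-- stated objective: faster
-- what changed: B replaces A's construction of the full 100000-element table with a direct recursion on the halving chain value(i)=6*value((i-1)//2)+(1 if i even else 0) from index N-1.
-- outside the precondition, e.g. on get_nth_system_number(0): A returns 3291365723617, B raises RecursionError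
import Mathlib
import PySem

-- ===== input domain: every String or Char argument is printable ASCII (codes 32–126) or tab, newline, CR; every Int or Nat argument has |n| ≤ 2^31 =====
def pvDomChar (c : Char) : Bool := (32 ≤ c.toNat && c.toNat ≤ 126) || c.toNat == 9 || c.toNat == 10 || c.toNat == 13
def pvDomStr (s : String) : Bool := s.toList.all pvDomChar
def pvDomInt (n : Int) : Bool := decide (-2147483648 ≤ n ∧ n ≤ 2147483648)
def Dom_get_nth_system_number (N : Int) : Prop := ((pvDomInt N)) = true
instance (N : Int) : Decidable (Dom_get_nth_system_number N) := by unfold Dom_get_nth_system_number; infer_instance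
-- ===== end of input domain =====

-- B replaces A's construction of the full 100000-entry table with a direct recursion on the
-- halving chain value(i) = 6*value((i-1)//2) + (1 if i even else 0); objective: faster (asymptotic).


-- ===== PORT A =====
-- Loop body of A; the state is (system_numbers, c, a).  list.append is O(1) in Python, so the
-- growing list is held as an Array (push = append).  c is a nonnegative index that always stays
-- strictly below the list length (c ≤ x/2 < size), so Array.getD is exact for Python's s[c].
def pvAStep (st : Array Int × Nat × Int) (x : Int) : Array Int × Nat × Int :=
  let (s, c, a) := st
  if PySem.Int.mod x 2 == 1 then
    let a' := s.getD c 0 * 6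
    (s.push a', c, a')
  else
    (s.push (a + 1), c + 1, a)

def get_nth_system_number (N : Int) : Int :=
  -- system_numbers = [1, 6, 7]; c = 1; a starts unassigned (first iteration x = 3 assigns it)
  let st := (PySem.List.pyRange 3 100001 1).foldl pvAStep (#[1, 6, 7], 1, 0)
  -- system_numbers[N - 1]; the IndexError case (none) is excluded by Pre_
  (PySem.List.pyGet? st.1.toList (N - 1)).getD 0

-- ===== PORT B =====
-- term(i) from Source B.  The Lean guard is 'i ≤ 0' only to make the function total: Python's term
-- recurses forever for i < 0 (those inputs are outside Pre_); for i ≥ 0 this is exact.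
def pvTerm (i : Int) : Int :=
  if i ≤ 0 then 1
  else 6 * pvTerm (PySem.Int.floordiv (i - 1) 2) + (1 - PySem.Int.mod i 2)
termination_by i.toNat
decreasing_by
  rw [PySem.Int.floordiv_eq_ediv_of_pos (by omega)]
  omega

def get_nth_system_number_alt (N : Int) : Int := pvTerm (N - 1)

-- ===== PRECONDITION & SPEC =====
-- Pre_ excludes N > 100001, where A raises IndexError, and N ≤ 0, where A's value comes from
-- Python negative-index wraparound into the table (an artefact) and B's recursion does not
-- terminate (RecursionError).
def Pre_get_nth_system_number (N : Int) : Prop := 1 ≤ N ∧ N ≤ 100001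
instance (N : Int) : Decidable (Pre_get_nth_system_number N) := by unfold Pre_get_nth_system_number; infer_instance
def pvWitness_get_nth_system_number : Int := 5

def Spec_get_nth_system_number (N : Int) (out : Int) : Prop := out = get_nth_system_number_alt N
instance (N : Int) (out : Int) : Decidable (Spec_get_nth_system_number N out) := by unfold Spec_get_nth_system_number; infer_instance

-- ===== CLAIM (what is proved, stated in full; the proofs are below) =====
def Claim_equal_get_nth_system_number : Prop := ∀ (N : Int), Dom_get_nth_system_number N → Pre_get_nth_system_number N → Spec_get_nth_system_number N (get_nth_system_number N)

-- ===== LEMMAS AND PROOFS =====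

-- fuel-indexed copy of pvTerm, used only to evaluate pvTerm on literals by kernel reduction
def pvTermFuel : Nat → Int → Int
  | 0, _ => 1
  | f + 1, i =>
    if i ≤ 0 then 1
    else 6 * pvTermFuel f (PySem.Int.floordiv (i - 1) 2) + (1 - PySem.Int.mod i 2)

lemma pvTerm_fuel (f : Nat) : ∀ i : Int, i.toNat < 2 ^ f → pvTermFuel f i = pvTerm i := by
  induction f with
  | zero =>
    intro i h
    have hi : i ≤ 0 := by omega
    simp only [pvTermFuel]
    rw [pvTerm, if_pos hi]
  | succ g ih =>
    intro i h
    simp only [pvTermFuel]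
    by_cases hi : i ≤ 0
    · rw [if_pos hi, pvTerm, if_pos hi]
    · rw [if_neg hi, pvTerm, if_neg hi]
      congr 2
      apply ih
      rw [PySem.Int.floordiv_eq_ediv_of_pos (by norm_num)]
      have hp : (2 : Nat) ^ (g + 1) = 2 * 2 ^ g := by ring
      rw [hp] at h
      omega

lemma pvTerm_natCast (n : Nat) (h : 1 ≤ n) :
    pvTerm (n : Int) = 6 * pvTerm (((n - 1) / 2 : Nat) : Int) + (1 - ((n % 2 : Nat) : Int)) := by
  rw [pvTerm]
  rw [if_neg (by exact_mod_cast by omega)]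
  congr 2
  · congr 1
    rw [PySem.Int.floordiv_eq_ediv_of_pos (by omega)]
    omega
  · have h2 : PySem.Int.mod (n : Int) 2 = ((n % 2 : Nat) : Int) := by
      exact_mod_cast PySem.Int.mod_natCast n 2
    rw [h2]

-- the table A builds, characterised in terms of B's recurrence
def pvSysL (n : Nat) : List Int := (List.range n).map (fun (i : Nat) => pvTerm (i : Int))

lemma pvSysL_succ (n : Nat) : pvSysL (n + 1) = pvSysL n ++ [pvTerm (n : Int)] := by
  simp [pvSysL, List.range_succ]

lemma pvSysL_getElem? (n k : Nat) (h : k < n) : (pvSysL n)[k]? = some (pvTerm (k : Int)) := by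
  unfold pvSysL
  rw [List.getElem?_map, List.getElem?_range h]
  rfl

lemma pvSysL_three : pvSysL 3 = [1, 6, 7] := by
  have h0 : pvTerm 0 = 1 := by rw [← pvTerm_fuel 2 0 (by decide)]; decide
  have h1 : pvTerm 1 = 6 := by rw [← pvTerm_fuel 2 1 (by decide)]; decide
  have h2 : pvTerm 2 = 7 := by rw [← pvTerm_fuel 3 2 (by decide)]; decide
  rw [pvSysL, show List.range 3 = [0, 1, 2] from rfl]
  simp [h0, h1, h2]

-- value of A's auxiliary variable a after the loop has processed x = 3 .. n-1
def pvAV (n : Nat) : Int := if n ≤ 3 then 0 else pvTerm ((2 * ((n - 2) / 2) + 1 : Nat) : Int)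

lemma pvInv (n : Nat) (h3 : 3 ≤ n) :
    (PySem.List.pyRange 3 (n : Int) 1).foldl pvAStep (#[1, 6, 7], 1, 0)
      = ((pvSysL n).toArray, (n - 1) / 2, pvAV n) := by
  induction n with
  | zero => omega
  | succ m ih =>
    rcases Nat.lt_or_ge m 3 with hm | hm
    · -- n = 3: the range is empty
      have hm2 : m = 2 := by omega
      subst hm2
      rw [show (((2 : Nat) + 1 : Nat) : Int) = 3 by norm_num]
      rw [PySem.List.pyRange_one_eq_nil (by norm_num), List.foldl_nil, pvSysL_three]
      unfold pvAV
      norm_num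
    · -- n = m+1 with m ≥ 3: peel off the last iteration x = m
      have hcast : ((m + 1 : Nat) : Int) = (m : Int) + 1 := by push_cast; ring
      rw [hcast, PySem.List.pyRange_one_succ_right (by exact_mod_cast by omega),
          List.foldl_append, ih hm]
      simp only [List.foldl]
      have hmod : PySem.Int.mod (m : Int) 2 = ((m % 2 : Nat) : Int) := by
        exact_mod_cast PySem.Int.mod_natCast m 2
      rcases Nat.even_or_odd m with he | ho
      · -- x = m even (so m ≥ 4): append a+1, c += 1
        obtain ⟨t, ht⟩ := he
        have hbranch : (PySem.Int.mod (m : Int) 2 == 1) = false := by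
          rw [hmod]; have hz : m % 2 = 0 := by omega
          rw [hz]; decide
        simp only [pvAStep, hbranch, Bool.false_eq_true, if_false]
        have haV : pvAV m = pvTerm ((m - 1 : Nat) : Int) := by
          unfold pvAV
          rw [if_neg (by omega)]
          congr 2
          omega
        have hstep : pvAV m + 1 = pvTerm (m : Int) := by
          rw [haV, pvTerm_natCast m (by omega), pvTerm_natCast (m - 1) (by omega)]
          have e1 : (m - 1) % 2 = 1 := by omega
          have e2 : (m - 1 - 1) / 2 = (m - 1) / 2 := by omega
          have e3 : m % 2 = 0 := by omega
          rw [e1, e2, e3]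
          push_cast
          ring
        refine Prod.ext ?_ (Prod.ext ?_ ?_)
        · simp only [pvSysL_succ]
          rw [← hstep]
          simp
        · simp only
          omega
        · simp only
          unfold pvAV
          rw [if_neg (by omega), if_neg (by omega)]
          congr 2
          omega
      · -- x = m odd: a = s[c]*6, append a
        obtain ⟨t, ht⟩ := ho
        have hbranch : (PySem.Int.mod (m : Int) 2 == 1) = true := by
          rw [hmod]; have hz : m % 2 = 1 := by omega
          rw [hz]; decide
        simp only [pvAStep, hbranch, if_true]
        have hget : ((pvSysL m).toArray).getD ((m - 1) / 2) 0 = pvTerm (((m - 1) / 2 : Nat) : Int) := by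
          rw [Array.getD_eq_getD_getElem?, List.getElem?_toArray,
              pvSysL_getElem? m ((m - 1) / 2) (by omega), Option.getD_some]
        have hstep : ((pvSysL m).toArray).getD ((m - 1) / 2) 0 * 6 = pvTerm (m : Int) := by
          rw [hget, pvTerm_natCast m (by omega)]
          have hz : m % 2 = 1 := by omega
          rw [hz]
          push_cast
          ring
        refine Prod.ext ?_ (Prod.ext ?_ ?_)
        · simp only [pvSysL_succ]
          rw [hstep]
          simp
        · simp only
          omega
        · simp only
          rw [hstep]
          unfold pvAV
          rw [if_neg (by omega)]
          congr 2
          omega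

lemma pvTable : ((PySem.List.pyRange 3 100001 1).foldl pvAStep (#[1, 6, 7], 1, 0)).1
    = (pvSysL 100001).toArray := by
  have h := pvInv 100001 (by norm_num)
  rw [show ((100001 : Nat) : Int) = (100001 : Int) by norm_num] at h
  rw [h]

-- ===== VERDICT (by name: the statement is the Claim_ definition above) =====
theorem get_nth_system_number_spec : Claim_equal_get_nth_system_number := by
  intro N _ hPre
  obtain ⟨h1, h2⟩ := hPre
  unfold Spec_get_nth_system_number get_nth_system_number get_nth_system_number_alt
  show (PySem.List.pyGet? ((PySem.List.pyRange 3 100001 1).foldl pvAStep (#[1, 6, 7], 1, 0)).1.toList (N - 1)).getD 0 = pvTerm (N - 1)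
  rw [pvTable, List.toList_toArray]
  have hk : N - 1 = (((N - 1).toNat : Nat) : Int) := by omega
  rw [hk, PySem.List.pyGet?_natCast]
  rw [pvSysL_getElem? 100001 (N - 1).toNat (by omega), Option.getD_some, ← hk]
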